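-- pv_equiv track=rewrite | github.com/kimdukbae/Algorithm_Study | 프로그래머스/KAKAO_2020/LINE_1.py | solution
-- ===== SOURCE A (Python) =====
-- from collections import deque
--
-- def solution(cony, brown):
--     time = 0
--     visit = [[0] * 2 for _ in range(200001)]
--     q = deque()
--     q.append((brown, 0))
--
--     while 1:
--         cony += time
--
--         if cony > 200000:
--             return -1
--         if visit[cony][time % 2]:
--             return time
--
--         for i in range(0, len(q)):
--             current = q.popleft()
--             currentPosition = current[0]
--             newTime = (current[1] + 1) % 2
--
--             newPosition = currentPosition - 1
--             if newPosition >= 0 and not visit[newPosition][newTime]: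
--                 visit[newPosition][newTime] = True
--                 q.append((newPosition, newTime))
--
--             newPosition = currentPosition + 1
--             if newPosition < 200001 and not visit[newPosition][newTime]:
--                 visit[newPosition][newTime] = True
--                 q.append((newPosition, newTime))
--
--             newPosition = currentPosition * 2
--             if newPosition < 200001 and not visit[newPosition][newTime]:
--                 visit[newPosition][newTime] = True
--                 q.append((newPosition, newTime))
--
--         time += 1
-- ===== SOURCE B (Python) =====
-- def solution(cony, brown):
--     # Phase 1: level-order BFS from brown, filling dist[pos][parity] = first
--     # round at which pos is reached with that parity (the start itself is not
--     # recorded at parity 0).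
--     dist = [[None, None] for _ in range(200001)]
--     frontier = [brown]
--     d = 0
--     while frontier:
--         d += 1
--         par = d % 2
--         nxt = []
--         for p in frontier:
--             for np in (p - 1, p + 1, 2 * p):
--                 if 0 <= np <= 200000 and dist[np][par] is None:
--                     dist[np][par] = d
--                     nxt.append(np)
--         frontier = nxt
--     # Phase 2: linear scan over time.
--     t = 0
--     while True:
--         cony += t
--         if cony > 200000:
--             return -1
--         dd = dist[cony][t % 2]
--         if dd is not None and dd <= t:
--             return t
--         t += 1
-- ===== Notes on version B (the rewrite author's own statement) =====
-- stated objective: alternative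
-- what changed: B splits A's single interleaved expand-and-check loop into two phases: a complete level-order BFS from brown filling a dist[pos][parity] table of first-reach rounds (with Brown's start left unmarked at parity 0), followed by a separate linear scan over t that returns the first t with dist[cony+T(t)][t%2] <= t, or -1 once Cony leaves the board.
-- outside the precondition, e.g. on solution(3, -5): A returns 15, B returns -1
import Mathlib
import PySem

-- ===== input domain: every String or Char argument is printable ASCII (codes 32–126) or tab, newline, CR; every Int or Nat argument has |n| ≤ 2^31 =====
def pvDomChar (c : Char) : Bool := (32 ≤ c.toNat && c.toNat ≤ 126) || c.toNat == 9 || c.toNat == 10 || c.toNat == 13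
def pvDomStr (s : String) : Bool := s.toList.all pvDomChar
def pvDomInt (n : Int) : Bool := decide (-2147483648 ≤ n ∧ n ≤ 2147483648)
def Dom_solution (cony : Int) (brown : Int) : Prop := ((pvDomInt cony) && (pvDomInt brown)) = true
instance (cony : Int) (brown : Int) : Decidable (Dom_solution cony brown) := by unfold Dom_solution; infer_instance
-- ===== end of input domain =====

-- B replaces A's single interleaved expand-and-check loop by a two-phase program
-- (complete level-order BFS filling a distance table, then a separate linear scan
-- over time); objective: alternative decomposition, not claimed to be faster.

-- Both Python programs index a 200001-row table; Python list indexing accepts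
-- negative indices down to -200001 (wraparound).  `pyRow` models that.
def pyRow (p : Int) : Nat := (if p < 0 then p + 200001 else p).toNat

-- tget / tset model Python's `tbl[p][e]` read / write on a 200001 × 2 table.
def tget {X : Type} (a : Array (Array X)) (p : Int) (e : Nat) (dflt : X) : X :=
  ((a[pyRow p]?).getD #[])[e]?.getD dflt

def tset {X : Type} (a : Array (Array X)) (p : Int) (e : Nat) (x : X) : Array (Array X) :=
  a.setIfInBounds (pyRow p) (((a[pyRow p]?).getD #[]).setIfInBounds e x)

-- ===== PORT A =====

def mkVisit : Array (Array Bool) := Array.replicate 200001 (Array.replicate 2 false)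

-- one `if newPosition … and not visit[...] : mark and append` block of A
def tryVisit (ok : Bool) (np : Int) (nt : Nat)
    (st : Array (Array Bool) × List (Int × Nat)) : Array (Array Bool) × List (Int × Nat) :=
  if ok && !(tget st.1 np nt false) then (tset st.1 np nt true, (np, nt) :: st.2)
  else st

-- A's inner `for i in range(0, len(q)): current = q.popleft(); …` loop;
-- newly appended pairs are accumulated in reverse and reversed at the end.
def procA : List (Int × Nat) → Array (Array Bool) → List (Int × Nat) →
    Array (Array Bool) × List (Int × Nat)
  | [], v, acc => (v, acc.reverse)
  | (p, par) :: rest, v, acc =>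
    let nt := (par + 1) % 2
    let st := tryVisit (decide (0 ≤ p - 1)) (p - 1) nt (v, acc)
    let st := tryVisit (decide (p + 1 < 200001)) (p + 1) nt st
    let st := tryVisit (decide (p * 2 < 200001)) (p * 2) nt st
    procA rest st.1 st.2

-- A's outer `while 1:` loop (cony += time; the two checks; one BFS round; time += 1)
def loopA (cony : Int) (time : Nat) (v : Array (Array Bool)) (q : List (Int × Nat)) : Int :=
  let c := cony + time
  if _h : c > 200000 then -1
  else if tget v c (time % 2) false then (time : Int)
  else
    let r := procA q v []
    loopA c (time + 1) r.1 r.2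
termination_by (200001 - (cony + time)).toNat
decreasing_by omega

def solution (cony : Int) (brown : Int) : Int :=
  loopA cony 0 mkVisit [(brown, 0)]

-- ===== PORT B =====

def mkDist : Array (Array (Option Nat)) := Array.replicate 200001 (Array.replicate 2 none)

-- B's `if 0 <= np <= 200000 and dist[np][par] is None: record and push` body
def markB (d par : Nat) (st : Array (Array (Option Nat)) × List Int) (np : Int) :
    Array (Array (Option Nat)) × List Int :=
  if 0 ≤ np ∧ np ≤ 200000 ∧ tget st.1 np par none = none
  then (tset st.1 np par (some d), np :: st.2)
  else st

-- B's `for p in frontier: for np in (p-1, p+1, 2*p): …` (nxt accumulated in reverse)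
def procB (d par : Nat) : List Int → Array (Array (Option Nat)) × List Int →
    Array (Array (Option Nat)) × List Int
  | [], st => st
  | p :: rest, st => procB d par rest (markB d par (markB d par (markB d par st (p - 1)) (p + 1)) (2 * p))

-- B's `while frontier:` loop (fuel only makes the recursion total; the queue in
-- fact always empties long before 500000 rounds)
def bfsB : Nat → Array (Array (Option Nat)) → List Int → Nat → Array (Array (Option Nat))
  | 0, dist, _, _ => dist
  | fuel + 1, dist, frontier, d =>
    if frontier = [] then dist
    else
      let d' := d + 1
      let st := procB d' (d' % 2) frontier (dist, [])
      bfsB fuel st.1 st.2.reverse d'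

-- B's scan phase: `while True: cony += t; …`
def scanB (cony : Int) (t : Nat) (dist : Array (Array (Option Nat))) : Int :=
  let c := cony + t
  if _h : c > 200000 then -1
  else
    let dd := tget dist c (t % 2) none
    if (match dd with | some dv => decide (dv ≤ t) | none => false) then (t : Int)
    else scanB c (t + 1) dist
termination_by (200001 - (cony + t)).toNat
decreasing_by omega

def solution_alt (cony : Int) (brown : Int) : Int :=
  scanB cony 0 (bfsB 500000 mkDist [brown] 0)

-- ===== PRECONDITION & SPEC =====
-- Pre_ keeps the natural domain of the puzzle: 0 ≤ brown ≤ 200001 (from 200001,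
-- one off the board, A still starts a normal BFS; a negative brown makes A mark
-- accidental wrapped cells, and brown ≥ 200002 raises IndexError), except that
-- any cony > 200000 is admitted (A answers -1 at once, before brown is ever
-- used); cony < -200001 always raises IndexError in A.
def Pre_solution (cony : Int) (brown : Int) : Prop :=
  -200001 ≤ cony ∧ (200000 < cony ∨ (0 ≤ brown ∧ brown ≤ 200001))
instance (cony : Int) (brown : Int) : Decidable (Pre_solution cony brown) := by
  unfold Pre_solution; infer_instance

def pvWitness_solution : Int × Int := (3, 8)

def Spec_solution (cony : Int) (brown : Int) (out : Int) : Prop := out = solution_alt cony brown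
instance (cony : Int) (brown : Int) (out : Int) : Decidable (Spec_solution cony brown out) := by
  unfold Spec_solution; infer_instance

-- ===== CLAIM (what is proved, stated in full; the proofs are below) =====
def Claim_equal_solution : Prop := ∀ (cony : Int) (brown : Int), Dom_solution cony brown → Pre_solution cony brown → Spec_solution cony brown (solution cony brown)

-- ===== LEMMAS AND PROOFS =====

-- ---- semantic layer: walks of the board graph ----

-- one Brown move, landing on the board
def EdgeTo (p p' : Int) : Prop :=
  (0 ≤ p' ∧ p' ≤ 200000) ∧ (p' = p - 1 ∨ p' = p + 1 ∨ p' = p * 2)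

-- Reach brown d p: some walk of exactly d moves from brown ends at p
def Reach (brown : Int) : Nat → Int → Prop
  | 0, p => p = brown
  | d + 1, p' => ∃ p, Reach brown d p ∧ EdgeTo p p'

-- Vp: cell (p, parity e) is marked after t BFS rounds
def Vp (brown : Int) (t : Nat) (p : Int) (e : Nat) : Prop :=
  ∃ d, 1 ≤ d ∧ d ≤ t ∧ d % 2 = e ∧ Reach brown d p

-- Fr: p is in the frontier entering round t+1 (freshly marked in round t)
def Fr (brown : Int) (t : Nat) (p : Int) : Prop :=
  Reach brown t p ∧ ∀ d, 1 ≤ d → d < t → d % 2 = t % 2 → ¬ Reach brown d p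

theorem reach_range (brown : Int) (d : Nat) (p : Int) (hd : 1 ≤ d) (h : Reach brown d p) :
    0 ≤ p ∧ p ≤ 200000 := by
  cases d with
  | zero => omega
  | succ d => obtain ⟨q, _, he⟩ := h; exact he.1

theorem fr_range (brown : Int) (hb : 0 ≤ brown ∧ brown ≤ 200001) (t : Nat) (p : Int)
    (h : Fr brown t p) : 0 ≤ p ∧ p ≤ 200001 := by
  cases t with
  | zero => cases h.1; exact hb
  | succ t =>
    obtain ⟨h0, h1⟩ := reach_range brown (t+1) p (by omega) h.1
    exact ⟨h0, by omega⟩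

theorem vp_succ (brown : Int) (t : Nat) (p' : Int) (e' : Nat) :
    Vp brown (t + 1) p' e' ↔
      (Vp brown t p' e' ∨ (e' = (t + 1) % 2 ∧ ∃ p, Fr brown t p ∧ EdgeTo p p')) := by
  constructor
  · rintro ⟨d, h1, hle, hpar, hr⟩
    by_cases hdt : d ≤ t
    · exact Or.inl ⟨d, h1, hdt, hpar, hr⟩
    · have hd : d = t + 1 := by omega
      subst hd
      obtain ⟨p, hp, he⟩ := hr
      by_cases hmin : ∃ m, 1 ≤ m ∧ m < t ∧ m % 2 = t % 2 ∧ Reach brown m p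
      · obtain ⟨m, hm1, hmt, hmp, hmr⟩ := hmin
        exact Or.inl ⟨m + 1, by omega, by omega, by omega, ⟨p, hmr, he⟩⟩
      · push_neg at hmin
        exact Or.inr ⟨by omega, p, ⟨hp, fun d hd1 hdt hdp => hmin d hd1 hdt hdp⟩, he⟩
  · rintro (⟨d, h1, hle, hpar, hr⟩ | ⟨hpar, p, hf, he⟩)
    · exact ⟨d, h1, by omega, hpar, hr⟩
    · exact ⟨t + 1, by omega, le_refl _, hpar.symm, ⟨p, hf.1, he⟩⟩

theorem fr_succ (brown : Int) (t : Nat) (p' : Int) :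
    Fr brown (t + 1) p' ↔
      ((∃ p, Fr brown t p ∧ EdgeTo p p') ∧ ¬ Vp brown t p' ((t + 1) % 2)) := by
  constructor
  · rintro ⟨hr, hmin⟩
    have hnv : ¬ Vp brown t p' ((t + 1) % 2) := by
      rintro ⟨d, h1, hle, hpar, hdr⟩
      exact hmin d h1 (by omega) (by omega) hdr
    refine ⟨?_, hnv⟩
    obtain ⟨p, hp, he⟩ := hr
    by_cases hm : ∃ m, 1 ≤ m ∧ m < t ∧ m % 2 = t % 2 ∧ Reach brown m p
    · obtain ⟨m, hm1, hmt, hmp, hmr⟩ := hm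
      exact absurd ⟨m + 1, by omega, by omega, by omega, ⟨p, hmr, he⟩⟩ hnv
    · push_neg at hm
      exact ⟨p, ⟨hp, fun d h1 h2 h3 => hm d h1 h2 h3⟩, he⟩
  · rintro ⟨⟨p, hf, he⟩, hnv⟩
    refine ⟨⟨p, hf.1, he⟩, ?_⟩
    intro d h1 hlt hpar hr
    exact hnv ⟨d, h1, by omega, by omega, hr⟩

theorem fr_empty_succ (brown : Int) (t : Nat) (h : ∀ p, ¬ Fr brown t p) :
    ∀ p, ¬ Fr brown (t + 1) p := by
  intro p hp
  obtain ⟨⟨q, hq, _⟩, _⟩ := (fr_succ brown t p).1 hp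
  exact h q hq

theorem fr_empty_ge (brown : Int) (t t' : Nat) (htt : t ≤ t') (h : ∀ p, ¬ Fr brown t p) :
    ∀ p, ¬ Fr brown t' p := by
  induction t' with
  | zero =>
    have ht0 : t = 0 := by omega
    subst ht0; exact h
  | succ t' ih =>
    by_cases ht : t ≤ t'
    · exact fr_empty_succ brown t' (ih ht)
    · have : t = t' + 1 := by omega
      subst this; exact h

theorem vp_iff_fr (brown : Int) (t : Nat) (p : Int) (e : Nat) :
    Vp brown t p e ↔ ∃ dv, 1 ≤ dv ∧ dv ≤ t ∧ dv % 2 = e ∧ Fr brown dv p := by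
  constructor
  · rintro ⟨d, h1, hle, hpar, hr⟩
    set S : Set Nat := {m | 1 ≤ m ∧ m % 2 = e ∧ Reach brown m p} with hS
    have hdS : d ∈ S := ⟨h1, hpar, hr⟩
    have hne : S.Nonempty := ⟨d, hdS⟩
    obtain ⟨hi1, hip, hir⟩ := Nat.sInf_mem hne
    refine ⟨sInf S, hi1, le_trans (Nat.sInf_le hdS) hle, hip, hir, ?_⟩
    intro m hm1 hmlt hmp hmr
    have : sInf S ≤ m := Nat.sInf_le ⟨hm1, by omega, hmr⟩
    omega
  · rintro ⟨dv, h1, hle, hpar, hf, _⟩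
    exact ⟨dv, h1, hle, hpar, hf⟩

-- ---- table layer ----

def ValidIdx (p : Int) (e : Nat) : Prop := 0 ≤ p ∧ p ≤ 200000 ∧ e < 2

def TblWF {X : Type} (a : Array (Array X)) : Prop :=
  a.size = 200001 ∧ ∀ i (h : i < a.size), (a[i]).size = 2

theorem tblWF_mk {X : Type} (x : X) : TblWF (Array.replicate 200001 (Array.replicate 2 x)) := by
  constructor
  · exact Array.size_replicate
  · intro i h
    simp [Array.getElem_replicate]

theorem tget_mk {X : Type} (x : X) (p : Int) (e : Nat) :
    tget (Array.replicate 200001 (Array.replicate 2 x)) p e x = x := by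
  unfold tget
  rcases Nat.lt_or_ge (pyRow p) 200001 with h | h
  · rw [Array.getElem?_replicate, if_pos h]
    simp only [Option.getD_some]
    rcases Nat.lt_or_ge e 2 with h2 | h2
    · rw [Array.getElem?_replicate, if_pos h2]; rfl
    · rw [Array.getElem?_replicate, if_neg (by omega)]; rfl
  · rw [Array.getElem?_replicate, if_neg (by omega)]
    rfl

theorem tget_wrap {X : Type} (a : Array (Array X)) (p : Int) (e : Nat) (dflt : X)
    (h0 : -200001 ≤ p) (h1 : p < 0) :
    tget a p e dflt = tget a (p + 200001) e dflt := by
  unfold tget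
  have : pyRow p = pyRow (p + 200001) := by unfold pyRow; split <;> split <;> omega
  rw [this]

theorem tset_WF {X : Type} (a : Array (Array X)) (p : Int) (e : Nat) (x : X)
    (h : TblWF a) : TblWF (tset a p e x) := by
  obtain ⟨hs, hr⟩ := h
  constructor
  · unfold tset; rw [Array.size_setIfInBounds]; exact hs
  · intro i hi
    unfold tset at hi ⊢
    rw [Array.size_setIfInBounds] at hi
    by_cases hip : pyRow p = i
    · subst hip
      rw [Array.getElem_setIfInBounds_self (by rwa [Array.size_setIfInBounds])]
      rw [Array.size_setIfInBounds]
      by_cases hlt : pyRow p < a.size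
      · rw [Array.getElem?_eq_getElem hlt]
        simpa using hr (pyRow p) hlt
      · omega
    · rw [Array.getElem_setIfInBounds_ne (by omega) hip]
      exact hr i (by omega)

theorem tget_tset {X : Type} (a : Array (Array X)) (p : Int) (e : Nat) (x : X) (dflt : X)
    (hWF : TblWF a) (hv : ValidIdx p e) (p' : Int) (e' : Nat)
    (hv' : 0 ≤ p' ∧ p' ≤ 200000) :
    tget (tset a p e x) p' e' dflt =
      if p' = p ∧ e' = e then x else tget a p' e' dflt := by
  obtain ⟨hs, hr⟩ := hWF
  obtain ⟨hp0, hp1, he⟩ := hv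
  have hrowlt : pyRow p < a.size := by rw [hs]; unfold pyRow; omega
  have hrow'lt : pyRow p' < a.size := by rw [hs]; unfold pyRow; omega
  have hrowsz : (a[pyRow p]).size = 2 := hr _ hrowlt
  unfold tget tset
  by_cases hpp : p' = p
  · subst hpp
    rw [Array.getElem?_setIfInBounds]
    rw [if_pos rfl, if_pos hrowlt]
    simp only [Option.getD_some]
    rw [Array.getElem?_eq_getElem hrowlt]
    simp only [Option.getD_some]
    rw [Array.getElem?_setIfInBounds]
    by_cases hee : e' = e
    · subst hee
      rw [if_pos rfl, if_pos (by omega)]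
      simp
    · rw [if_neg (fun hh => hee hh.symm), if_neg (by tauto)]
  · have hrowne : pyRow p ≠ pyRow p' := by
      unfold pyRow; intro hh; apply hpp
      split at hh <;> split at hh <;> omega
    rw [Array.getElem?_setIfInBounds, if_neg hrowne, if_neg (by tauto)]

-- ---- characterisation of one marking block ----

-- what one A-block does to the table and the accumulator
theorem tryVisit_char (ok : Bool) (np : Int) (nt : Nat)
    (v : Array (Array Bool)) (acc : List (Int × Nat))
    (hWF : TblWF v) (hok : ok = true → ValidIdx np nt) :
    TblWF (tryVisit ok np nt (v, acc)).1 ∧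
    (∀ p' e', (0 ≤ p' ∧ p' ≤ 200000) →
      (tget (tryVisit ok np nt (v, acc)).1 p' e' false = true ↔
        (tget v p' e' false = true ∨ (ok = true ∧ p' = np ∧ e' = nt)))) ∧
    (∀ x, x ∈ (tryVisit ok np nt (v, acc)).2 ↔
      (x ∈ acc ∨ (ok = true ∧ x = (np, nt) ∧ tget v np nt false = false))) := by
  unfold tryVisit
  dsimp only
  by_cases hc : (ok && !(tget v np nt false)) = true
  · rw [if_pos hc]
    simp only [Bool.and_eq_true, Bool.not_eq_true'] at hc
    obtain ⟨hco, hcf⟩ := hc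
    have hvi := hok hco
    refine ⟨tset_WF v np nt true hWF, ?_, ?_⟩
    · intro p' e' hv'
      rw [tget_tset v np nt true false hWF hvi p' e' hv']
      by_cases hpe : p' = np ∧ e' = nt
      · simp [hpe, hco]
      · rw [if_neg hpe]
        constructor
        · exact fun h => Or.inl h
        · rintro (h | ⟨_, hp, he⟩)
          · exact h
          · exact absurd ⟨hp, he⟩ hpe
    · intro x
      simp only [List.mem_cons]
      constructor
      · rintro (h | h)
        · exact Or.inr ⟨hco, h, hcf⟩
        · exact Or.inl h
      · rintro (h | ⟨_, h, _⟩)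
        · exact Or.inr h
        · exact Or.inl h
  · rw [if_neg hc]
    simp only [Bool.and_eq_true, Bool.not_eq_true'] at hc
    push_neg at hc
    refine ⟨hWF, ?_, ?_⟩
    · intro p' e' hv'
      constructor
      · exact fun h => Or.inl h
      · rintro (h | ⟨hco, hp, he⟩)
        · exact h
        · subst hp; subst he
          have := hc hco
          simp only [Bool.not_eq_false] at this
          exact this
    · intro x
      constructor
      · exact fun h => Or.inl h
      · rintro (h | ⟨hco, hx, hf⟩)
        · exact h
        · exact absurd hf (by simp [hc hco])

-- what one B-block does
theorem markB_char (d par : Nat) (dist : Array (Array (Option Nat))) (nxt : List Int) (np : Int)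
    (hWF : TblWF dist) (hpar : par < 2) :
    TblWF (markB d par (dist, nxt) np).1 ∧
    (∀ p' e' (dv : Nat), (0 ≤ p' ∧ p' ≤ 200000) →
      (tget (markB d par (dist, nxt) np).1 p' e' none = some dv ↔
        (tget dist p' e' none = some dv ∨
          (0 ≤ np ∧ np ≤ 200000 ∧ tget dist np par none = none ∧ p' = np ∧ e' = par ∧ dv = d)))) ∧
    (∀ x, x ∈ (markB d par (dist, nxt) np).2 ↔
      (x ∈ nxt ∨ (0 ≤ np ∧ np ≤ 200000 ∧ tget dist np par none = none ∧ x = np))) := by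
  unfold markB
  dsimp only
  by_cases hc : 0 ≤ np ∧ np ≤ 200000 ∧ tget dist np par none = none
  · rw [if_pos hc]
    obtain ⟨h0, h1, hn⟩ := hc
    have hvi : ValidIdx np par := ⟨h0, h1, hpar⟩
    refine ⟨tset_WF dist np par (some d) hWF, ?_, ?_⟩
    · intro p' e' dv hv'
      rw [tget_tset dist np par (some d) none hWF hvi p' e' hv']
      by_cases hpe : p' = np ∧ e' = par
      · rw [if_pos hpe]
        constructor
        · intro h
          exact Or.inr ⟨h0, h1, hn, hpe.1, hpe.2, by simpa using h.symm⟩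
        · rintro (h | ⟨_, _, _, hp, he, hd⟩)
          · rw [hpe.1, hpe.2, hn] at h; exact absurd h (by simp)
          · rw [hd]
      · rw [if_neg hpe]
        constructor
        · exact fun h => Or.inl h
        · rintro (h | ⟨_, _, _, hp, he, _⟩)
          · exact h
          · exact absurd ⟨hp, he⟩ hpe
    · intro x
      simp only [List.mem_cons]
      constructor
      · rintro (h | h)
        · exact Or.inr ⟨h0, h1, hn, h⟩
        · exact Or.inl h
      · rintro (h | ⟨_, _, _, hx⟩)
        · exact Or.inr h
        · exact Or.inl hx
  · rw [if_neg hc]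
    refine ⟨hWF, ?_, ?_⟩
    · intro p' e' dv hv'
      constructor
      · exact fun h => Or.inl h
      · rintro (h | ⟨h0, h1, hn, hp, he, hd⟩)
        · exact h
        · exact absurd ⟨h0, h1, hn⟩ hc
    · intro x
      constructor
      · exact fun h => Or.inl h
      · rintro (h | ⟨h0, h1, hn, _⟩)
        · exact h
        · exact absurd ⟨h0, h1, hn⟩ hc


-- ---- characterisation of one full round ----

theorem tryVisit_mono (ok : Bool) (np : Int) (nt : Nat)
    (v : Array (Array Bool)) (acc : List (Int × Nat))
    (hWF : TblWF v) (hok : ok = true → ValidIdx np nt)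
    (p' : Int) (e' : Nat) (hv' : 0 ≤ p' ∧ p' ≤ 200000)
    (h : tget (tryVisit ok np nt (v, acc)).1 p' e' false = false) :
    tget v p' e' false = false := by
  have hch := (tryVisit_char ok np nt v acc hWF hok).2.1 p' e' hv'
  cases hvv : tget v p' e' false
  · rfl
  · rw [hch.2 (Or.inl hvv)] at h; cases h

theorem procA_char (l : List (Int × Nat)) :
    ∀ (v : Array (Array Bool)) (acc : List (Int × Nat)),
    TblWF v →
    (∀ pe ∈ l, 0 ≤ pe.1 ∧ pe.1 ≤ 200001) →
    TblWF (procA l v acc).1 ∧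
    (∀ p' e', (0 ≤ p' ∧ p' ≤ 200000) →
      (tget (procA l v acc).1 p' e' false = true ↔
        (tget v p' e' false = true ∨ ∃ pe ∈ l, e' = (pe.2 + 1) % 2 ∧ EdgeTo pe.1 p'))) ∧
    (∀ x : Int × Nat, x ∈ (procA l v acc).2 ↔
      (x ∈ acc ∨ (tget v x.1 x.2 false = false ∧
        ∃ pe ∈ l, x.2 = (pe.2 + 1) % 2 ∧ EdgeTo pe.1 x.1))) := by
  induction l with
  | nil =>
    intro v acc hWF _
    refine ⟨hWF, ?_, ?_⟩
    · intro p' e' _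
      simp [procA]
    · intro x
      simp [procA]
  | cons hd rest ih =>
    intro v acc hWF hl
    obtain ⟨p, par⟩ := hd
    have hp : 0 ≤ p ∧ p ≤ 200001 := hl (p, par) List.mem_cons_self
    have hrest : ∀ pe ∈ rest, 0 ≤ pe.1 ∧ pe.1 ≤ 200001 :=
      fun pe hpe => hl pe (List.mem_cons_of_mem _ hpe)
    set nt := (par + 1) % 2 with hnt
    have hnt2 : nt < 2 := by omega
    -- block 1
    have hok1 : decide (0 ≤ p - 1) = true → ValidIdx (p - 1) nt := by
      intro h; rw [decide_eq_true_iff] at h; exact ⟨h, by omega, hnt2⟩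
    obtain ⟨hW1, hT1, hA1⟩ := tryVisit_char (decide (0 ≤ p - 1)) (p - 1) nt v acc hWF hok1
    set st1 := tryVisit (decide (0 ≤ p - 1)) (p - 1) nt (v, acc) with hst1
    -- block 2
    have hok2 : decide (p + 1 < 200001) = true → ValidIdx (p + 1) nt := by
      intro h; rw [decide_eq_true_iff] at h; exact ⟨by omega, by omega, hnt2⟩
    obtain ⟨hW2, hT2, hA2⟩ := tryVisit_char (decide (p + 1 < 200001)) (p + 1) nt st1.1 st1.2 hW1 hok2
    rw [Prod.mk.eta] at hW2 hT2 hA2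
    set st2 := tryVisit (decide (p + 1 < 200001)) (p + 1) nt st1 with hst2
    -- block 3
    have hok3 : decide (p * 2 < 200001) = true → ValidIdx (p * 2) nt := by
      intro h; rw [decide_eq_true_iff] at h; exact ⟨by omega, by omega, hnt2⟩
    obtain ⟨hW3, hT3, hA3⟩ := tryVisit_char (decide (p * 2 < 200001)) (p * 2) nt st2.1 st2.2 hW2 hok3
    rw [Prod.mk.eta] at hW3 hT3 hA3
    set st3 := tryVisit (decide (p * 2 < 200001)) (p * 2) nt st2 with hst3
    -- the round-head table characterisation
    have hT3v : ∀ p' e', (0 ≤ p' ∧ p' ≤ 200000) →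
        (tget st3.1 p' e' false = true ↔
          (tget v p' e' false = true ∨ (e' = nt ∧ EdgeTo p p'))) := by
      intro p' e' hv'
      rw [hT3 p' e' hv', hT2 p' e' hv', hT1 p' e' hv']
      unfold EdgeTo
      simp only [decide_eq_true_iff]
      constructor
      · rintro (((h | ⟨h1, hp', he'⟩) | ⟨h1, hp', he'⟩) | ⟨h1, hp', he'⟩)
        · exact Or.inl h
        · exact Or.inr ⟨he', ⟨by omega, by omega⟩, Or.inl hp'⟩
        · exact Or.inr ⟨he', ⟨by omega, by omega⟩, Or.inr (Or.inl hp')⟩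
        · exact Or.inr ⟨he', ⟨by omega, by omega⟩, Or.inr (Or.inr hp')⟩
      · rintro (h | ⟨he', ⟨hr0, hr1⟩, (hp' | hp' | hp')⟩)
        · exact Or.inl (Or.inl (Or.inl h))
        · exact Or.inl (Or.inl (Or.inr ⟨by omega, hp', he'⟩))
        · exact Or.inl (Or.inr ⟨by omega, hp', he'⟩)
        · exact Or.inr ⟨by omega, hp', he'⟩
    -- the round-head accumulator characterisation
    have hA3v : ∀ x : Int × Nat, x ∈ st3.2 ↔
        (x ∈ acc ∨ (x.2 = nt ∧ EdgeTo p x.1 ∧ tget v x.1 x.2 false = false)) := by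
      intro x
      rw [hA3 x, hA2 x, hA1 x]
      simp only [decide_eq_true_iff]
      constructor
      · rintro (((h | ⟨h1, hx, hf⟩) | ⟨h1, hx, hf⟩) | ⟨h1, hx, hf⟩)
        · exact Or.inl h
        · subst hx
          exact Or.inr ⟨rfl, ⟨⟨by omega, by omega⟩, Or.inl rfl⟩, hf⟩
        · subst hx
          have hfv : tget v (p + 1) nt false = false :=
            tryVisit_mono _ _ _ v acc hWF hok1 (p + 1) nt ⟨by omega, by omega⟩ hf
          exact Or.inr ⟨rfl, ⟨⟨by omega, by omega⟩, Or.inr (Or.inl rfl)⟩, hfv⟩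
        · subst hx
          have hfv1 : tget st1.1 (p * 2) nt false = false := by
            have := tryVisit_char (decide (p + 1 < 200001)) (p + 1) nt st1.1 st1.2 hW1 hok2
            rw [Prod.mk.eta] at this
            exact tryVisit_mono _ _ _ st1.1 st1.2 hW1 hok2 (p * 2) nt ⟨by omega, by omega⟩ hf
          have hfv : tget v (p * 2) nt false = false :=
            tryVisit_mono _ _ _ v acc hWF hok1 (p * 2) nt ⟨by omega, by omega⟩ hfv1
          exact Or.inr ⟨rfl, ⟨⟨by omega, by omega⟩, Or.inr (Or.inr rfl)⟩, hfv⟩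
      · rintro (h | ⟨he, ⟨⟨hr0, hr1⟩, (hx | hx | hx)⟩, hf⟩)
        · exact Or.inl (Or.inl (Or.inl h))
        · -- x = (p-1, nt)
          obtain ⟨x1, x2⟩ := x
          simp only at he hx hf ⊢
          subst he; subst hx
          exact Or.inl (Or.inl (Or.inr ⟨by omega, rfl, hf⟩))
        · -- x = (p+1, nt)
          obtain ⟨x1, x2⟩ := x
          simp only at he hx hf ⊢
          subst he; subst hx
          have hf1 : tget st1.1 (p + 1) nt false = false := by
            cases hvv : tget st1.1 (p + 1) nt false
            · rfl
            · rcases (hT1 (p + 1) nt ⟨by omega, by omega⟩).1 hvv with hc | ⟨_, hc, _⟩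
              · rw [hc] at hf; cases hf
              · omega
          exact Or.inl (Or.inr ⟨by omega, rfl, hf1⟩)
        · -- x = (p*2, nt)
          obtain ⟨x1, x2⟩ := x
          simp only at he hx hf ⊢
          subst he; subst hx
          by_cases hdup : p * 2 = p + 1
          · -- p = 1: the *2 candidate coincides with the +1 candidate, added by block 2
            have hfv : tget v (p + 1) nt false = false := by rw [← hdup]; exact hf
            have hf1 : tget st1.1 (p + 1) nt false = false := by
              cases hvv : tget st1.1 (p + 1) nt false
              · rfl
              · rcases (hT1 (p + 1) nt ⟨by omega, by omega⟩).1 hvv with hc | ⟨_, hc, _⟩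
                · rw [hc] at hfv; cases hfv
                · omega
            rw [hdup]
            exact Or.inl (Or.inr ⟨by omega, rfl, hf1⟩)
          · have hf1 : tget st1.1 (p * 2) nt false = false := by
              cases hvv : tget st1.1 (p * 2) nt false
              · rfl
              · rcases (hT1 (p * 2) nt ⟨by omega, by omega⟩).1 hvv with hc | ⟨_, hc, _⟩
                · rw [hc] at hf; cases hf
                · omega
            have hf2 : tget st2.1 (p * 2) nt false = false := by
              cases hvv : tget st2.1 (p * 2) nt false
              · rfl
              · rcases (hT2 (p * 2) nt ⟨by omega, by omega⟩).1 hvv with hc | ⟨_, hc, _⟩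
                · rw [hc] at hf1; cases hf1
                · omega
            exact Or.inr ⟨by omega, rfl, hf2⟩
    -- compose with the tail
    have hres : procA ((p, par) :: rest) v acc = procA rest st3.1 st3.2 := by
      simp only [procA]
      rw [hst3, hst2, hst1]
    obtain ⟨hWr, hTr, hAr⟩ := ih st3.1 st3.2 hW3 hrest
    rw [hres]
    refine ⟨hWr, ?_, ?_⟩
    · intro p' e' hv'
      rw [hTr p' e' hv', hT3v p' e' hv']
      constructor
      · rintro ((h | ⟨he, hedge⟩) | ⟨pe, hpe, hee, hedge⟩)
        · exact Or.inl h
        · exact Or.inr ⟨(p, par), List.mem_cons_self, he, hedge⟩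
        · exact Or.inr ⟨pe, List.mem_cons_of_mem _ hpe, hee, hedge⟩
      · rintro (h | ⟨pe, hpe, hee, hedge⟩)
        · exact Or.inl (Or.inl h)
        · rcases List.mem_cons.1 hpe with hh | hh
          · subst hh; exact Or.inl (Or.inr ⟨hee, hedge⟩)
          · exact Or.inr ⟨pe, hh, hee, hedge⟩
    · intro x
      rw [hAr x, hA3v x]
      have hrange : ∀ pe : Int × Nat, pe ∈ rest → EdgeTo pe.1 x.1 → (0 ≤ x.1 ∧ x.1 ≤ 200000) :=
        fun pe _ he => he.1
      constructor
      · rintro ((h | ⟨he, hedge, hf⟩) | ⟨hf3, pe, hpe, hee, hedge⟩)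
        · exact Or.inl h
        · exact Or.inr ⟨hf, (p, par), List.mem_cons_self, he, hedge⟩
        · have hfv : tget v x.1 x.2 false = false := by
            have hrg := hrange pe hpe hedge
            cases hvv : tget v x.1 x.2 false
            · rfl
            · rw [(hT3v x.1 x.2 hrg).2 (Or.inl hvv)] at hf3; cases hf3
          exact Or.inr ⟨hfv, pe, List.mem_cons_of_mem _ hpe, hee, hedge⟩
      · rintro (h | ⟨hf, pe, hpe, hee, hedge⟩)
        · exact Or.inl (Or.inl h)
        · rcases List.mem_cons.1 hpe with hh | hh
          · subst hh; exact Or.inl (Or.inr ⟨hee, hedge, hf⟩)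
          · by_cases hhd : x.2 = nt ∧ EdgeTo p x.1
            · exact Or.inl (Or.inr ⟨hhd.1, hhd.2, hf⟩)
            · have hf3 : tget st3.1 x.1 x.2 false = false := by
                have hrg := hrange pe hh hedge
                cases hvv : tget st3.1 x.1 x.2 false
                · rfl
                · rcases (hT3v x.1 x.2 hrg).1 hvv with hc | hc
                  · rw [hc] at hf; cases hf
                  · exact absurd hc hhd
              exact Or.inr ⟨hf3, pe, hh, hee, hedge⟩


theorem markB_keep (d par : Nat) (dist : Array (Array (Option Nat))) (nxt : List Int) (np : Int)
    (hWF : TblWF dist) (hpar : par < 2) (p' : Int) (e' : Nat) (dv : Nat)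
    (hv' : 0 ≤ p' ∧ p' ≤ 200000) (h : tget dist p' e' none = some dv) :
    tget (markB d par (dist, nxt) np).1 p' e' none = some dv :=
  ((markB_char d par dist nxt np hWF hpar).2.1 p' e' dv hv').2 (Or.inl h)

theorem markB_backnone (d par : Nat) (dist : Array (Array (Option Nat))) (nxt : List Int) (np : Int)
    (hWF : TblWF dist) (hpar : par < 2) (p' : Int) (e' : Nat)
    (hv' : 0 ≤ p' ∧ p' ≤ 200000)
    (h : tget (markB d par (dist, nxt) np).1 p' e' none = none) :
    tget dist p' e' none = none := by
  cases hd : tget dist p' e' none with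
  | none => rfl
  | some dv => rw [markB_keep d par dist nxt np hWF hpar p' e' dv hv' hd] at h; cases h

theorem markB_fwdnone (d par : Nat) (dist : Array (Array (Option Nat))) (nxt : List Int) (np : Int)
    (hWF : TblWF dist) (hpar : par < 2) (p' : Int) (e' : Nat)
    (hv' : 0 ≤ p' ∧ p' ≤ 200000) (hne : ¬ (p' = np ∧ e' = par))
    (h : tget dist p' e' none = none) :
    tget (markB d par (dist, nxt) np).1 p' e' none = none := by
  cases hr : tget (markB d par (dist, nxt) np).1 p' e' none with
  | none => rfl
  | some dv =>
    rcases ((markB_char d par dist nxt np hWF hpar).2.1 p' e' dv hv').1 hr with hc | ⟨_, _, _, hps, hes, _⟩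
    · rw [hc] at h; cases h
    · exact absurd ⟨hps, hes⟩ hne

theorem procB_char (d par : Nat) (hpar : par < 2) (l : List Int) :
    ∀ (st : Array (Array (Option Nat)) × List Int),
    TblWF st.1 →
    TblWF (procB d par l st).1 ∧
    (∀ (p' : Int) (e' : Nat) (dv : Nat), (0 ≤ p' ∧ p' ≤ 200000) →
      (tget (procB d par l st).1 p' e' none = some dv ↔
        (tget st.1 p' e' none = some dv ∨
          (tget st.1 p' e' none = none ∧ e' = par ∧ dv = d ∧ ∃ q ∈ l, EdgeTo q p')))) ∧
    (∀ x : Int, x ∈ (procB d par l st).2 ↔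
      (x ∈ st.2 ∨ (tget st.1 x par none = none ∧ ∃ q ∈ l, EdgeTo q x))) := by
  induction l with
  | nil =>
    intro st hWF
    refine ⟨hWF, ?_, ?_⟩
    · intro p' e' dv _
      simp [procB]
    · intro x
      simp [procB]
  | cons p rest ih =>
    intro st hWF
    obtain ⟨hW1, hT1, hA1⟩ := markB_char d par st.1 st.2 (p - 1) hWF hpar
    rw [Prod.mk.eta] at hW1 hT1 hA1
    set st1 := markB d par st (p - 1) with hst1
    obtain ⟨hW2, hT2, hA2⟩ := markB_char d par st1.1 st1.2 (p + 1) hW1 hpar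
    rw [Prod.mk.eta] at hW2 hT2 hA2
    set st2 := markB d par st1 (p + 1) with hst2
    obtain ⟨hW3, hT3, hA3⟩ := markB_char d par st2.1 st2.2 (2 * p) hW2 hpar
    rw [Prod.mk.eta] at hW3 hT3 hA3
    set st3 := markB d par st2 (2 * p) with hst3
    -- head table characterisation
    have hT3v : ∀ (p' : Int) (e' : Nat) (dv : Nat), (0 ≤ p' ∧ p' ≤ 200000) →
        (tget st3.1 p' e' none = some dv ↔
          (tget st.1 p' e' none = some dv ∨
            (tget st.1 p' e' none = none ∧ e' = par ∧ dv = d ∧ EdgeTo p p'))) := by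
      intro p' e' dv hv'
      rw [hT3 p' e' dv hv', hT2 p' e' dv hv', hT1 p' e' dv hv']
      unfold EdgeTo
      simp only [show p * 2 = 2 * p from mul_comm p 2]
      constructor
      · rintro (((h | ⟨hr0, hr1, hn, hps, hes, hds⟩) | ⟨hr0, hr1, hn, hps, hes, hds⟩) |
          ⟨hr0, hr1, hn, hps, hes, hds⟩)
        · exact Or.inl h
        · exact Or.inr ⟨by rwa [hps, hes], hes, hds, ⟨by omega, by omega⟩, Or.inl hps⟩
        · have hn0 : tget st.1 (p + 1) par none = none :=
            markB_backnone d par st.1 st.2 (p - 1) hWF hpar (p + 1) par ⟨by omega, by omega⟩ hn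
          exact Or.inr ⟨by rwa [hps, hes], hes, hds, ⟨by omega, by omega⟩, Or.inr (Or.inl (by omega))⟩
        · have hn1 : tget st1.1 (2 * p) par none = none :=
            markB_backnone d par st1.1 st1.2 (p + 1) hW1 hpar (2 * p) par ⟨by omega, by omega⟩ hn
          have hn0 : tget st.1 (2 * p) par none = none :=
            markB_backnone d par st.1 st.2 (p - 1) hWF hpar (2 * p) par ⟨by omega, by omega⟩ hn1
          exact Or.inr ⟨by rwa [hps, hes], hes, hds, ⟨by omega, by omega⟩, Or.inr (Or.inr (by omega))⟩
      · rintro (h | ⟨hn, hes, hds, ⟨hr0, hr1⟩, (hps | hps | hps)⟩)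
        · exact Or.inl (Or.inl (Or.inl h))
        · exact Or.inl (Or.inl (Or.inr ⟨by omega, by omega, by rwa [hps, hes] at hn, hps, hes, hds⟩))
        · have hn1 : tget st1.1 (p + 1) par none = none := by
            apply markB_fwdnone d par st.1 st.2 (p - 1) hWF hpar (p + 1) par ⟨by omega, by omega⟩
            · rintro ⟨hc, _⟩; omega
            · rwa [hps, hes] at hn
          exact Or.inl (Or.inr ⟨by omega, by omega, hn1, hps, hes, hds⟩)
        · by_cases hdup : 2 * p = p + 1
          · have hn1 : tget st1.1 (p + 1) par none = none := by
              apply markB_fwdnone d par st.1 st.2 (p - 1) hWF hpar (p + 1) par ⟨by omega, by omega⟩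
              · rintro ⟨hc, _⟩; omega
              · rw [hps, hes] at hn; rwa [hdup] at hn
            exact Or.inl (Or.inr ⟨by omega, by omega, hn1, by omega, hes, hds⟩)
          · have hn1 : tget st1.1 (2 * p) par none = none := by
              apply markB_fwdnone d par st.1 st.2 (p - 1) hWF hpar (2 * p) par ⟨by omega, by omega⟩
              · rintro ⟨hc, _⟩; omega
              · rwa [hps, hes] at hn
            have hn2 : tget st2.1 (2 * p) par none = none := by
              apply markB_fwdnone d par st1.1 st1.2 (p + 1) hW1 hpar (2 * p) par ⟨by omega, by omega⟩
              · rintro ⟨hc, _⟩; omega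
              · exact hn1
            exact Or.inr ⟨by omega, by omega, hn2, hps, hes, hds⟩
    -- head accumulator characterisation
    have hA3v : ∀ x : Int, x ∈ st3.2 ↔
        (x ∈ st.2 ∨ (tget st.1 x par none = none ∧ EdgeTo p x)) := by
      intro x
      rw [hA3 x, hA2 x, hA1 x]
      unfold EdgeTo
      simp only [show p * 2 = 2 * p from mul_comm p 2]
      constructor
      · rintro (((h | ⟨hr0, hr1, hn, hx⟩) | ⟨hr0, hr1, hn, hx⟩) | ⟨hr0, hr1, hn, hx⟩)
        · exact Or.inl h
        · subst hx; exact Or.inr ⟨hn, ⟨by omega, by omega⟩, Or.inl rfl⟩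
        · subst hx
          have hn0 : tget st.1 (p + 1) par none = none :=
            markB_backnone d par st.1 st.2 (p - 1) hWF hpar (p + 1) par ⟨by omega, by omega⟩ hn
          exact Or.inr ⟨hn0, ⟨by omega, by omega⟩, Or.inr (Or.inl rfl)⟩
        · subst hx
          have hn1 : tget st1.1 (2 * p) par none = none :=
            markB_backnone d par st1.1 st1.2 (p + 1) hW1 hpar (2 * p) par ⟨by omega, by omega⟩ hn
          have hn0 : tget st.1 (2 * p) par none = none :=
            markB_backnone d par st.1 st.2 (p - 1) hWF hpar (2 * p) par ⟨by omega, by omega⟩ hn1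
          exact Or.inr ⟨hn0, ⟨by omega, by omega⟩, Or.inr (Or.inr (by omega))⟩
      · rintro (h | ⟨hn, ⟨hr0, hr1⟩, (hx | hx | hx)⟩)
        · exact Or.inl (Or.inl (Or.inl h))
        · subst hx; exact Or.inl (Or.inl (Or.inr ⟨by omega, by omega, hn, rfl⟩))
        · subst hx
          have hn1 : tget st1.1 (p + 1) par none = none := by
            apply markB_fwdnone d par st.1 st.2 (p - 1) hWF hpar (p + 1) par ⟨by omega, by omega⟩
            · rintro ⟨hc, _⟩; omega
            · exact hn
          exact Or.inl (Or.inr ⟨by omega, by omega, hn1, rfl⟩)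
        · subst hx
          by_cases hdup : 2 * p = p + 1
          · have hn1 : tget st1.1 (p + 1) par none = none := by
              apply markB_fwdnone d par st.1 st.2 (p - 1) hWF hpar (p + 1) par ⟨by omega, by omega⟩
              · rintro ⟨hc, _⟩; omega
              · rwa [hdup] at hn
            rw [hdup]
            exact Or.inl (Or.inr ⟨by omega, by omega, hn1, rfl⟩)
          · have hn1 : tget st1.1 (2 * p) par none = none := by
              apply markB_fwdnone d par st.1 st.2 (p - 1) hWF hpar (2 * p) par ⟨by omega, by omega⟩
              · rintro ⟨hc, _⟩; omega
              · exact hn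
            have hn2 : tget st2.1 (2 * p) par none = none := by
              apply markB_fwdnone d par st1.1 st1.2 (p + 1) hW1 hpar (2 * p) par ⟨by omega, by omega⟩
              · rintro ⟨hc, _⟩; omega
              · exact hn1
            exact Or.inr ⟨by omega, by omega, hn2, rfl⟩
    -- compose with the tail
    have hres : procB d par (p :: rest) st = procB d par rest st3 := by
      simp only [procB]
      rw [hst3, hst2, hst1]
    obtain ⟨hWr, hTr, hAr⟩ := ih st3 hW3
    rw [hres]
    refine ⟨hWr, ?_, ?_⟩
    · intro p' e' dv hv'
      rw [hTr p' e' dv hv']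
      constructor
      · rintro (h | ⟨hn3, hes, hds, q, hq, hedge⟩)
        · rcases (hT3v p' e' dv hv').1 h with hc | ⟨hn, hes, hds, hedge⟩
          · exact Or.inl hc
          · exact Or.inr ⟨hn, hes, hds, p, List.mem_cons_self, hedge⟩
        · have hn : tget st.1 p' e' none = none := by
            cases hd0 : tget st.1 p' e' none with
            | none => rfl
            | some dw =>
              rw [(hT3v p' e' dw hv').2 (Or.inl hd0)] at hn3; cases hn3
          exact Or.inr ⟨hn, hes, hds, q, List.mem_cons_of_mem _ hq, hedge⟩
      · rintro (h | ⟨hn, hes, hds, q, hq, hedge⟩)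
        · exact Or.inl ((hT3v p' e' dv hv').2 (Or.inl h))
        · rcases List.mem_cons.1 hq with hh | hh
          · subst hh
            exact Or.inl ((hT3v p' e' dv hv').2 (Or.inr ⟨hn, hes, hds, hedge⟩))
          · by_cases hhd : tget st3.1 p' e' none = none
            · exact Or.inr ⟨hhd, hes, hds, q, hh, hedge⟩
            · cases h3 : tget st3.1 p' e' none with
              | none => exact absurd h3 hhd
              | some dw =>
                rcases (hT3v p' e' dw hv').1 h3 with hc | ⟨_, hes', hds', _⟩
                · rw [hn] at hc; cases hc
                · have hdd : dw = dv := by omega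
                  exact Or.inl (by rw [hdd])
    · intro x
      rw [hAr x]
      constructor
      · rintro (h | ⟨hn3, q, hq, hedge⟩)
        · rcases (hA3v x).1 h with hc | ⟨hn, hedge⟩
          · exact Or.inl hc
          · exact Or.inr ⟨hn, p, List.mem_cons_self, hedge⟩
        · have hrg : 0 ≤ x ∧ x ≤ 200000 := hedge.1
          have hn : tget st.1 x par none = none :=
            by
              cases hd0 : tget st.1 x par none with
              | none => rfl
              | some dw =>
                rw [(hT3v x par dw hrg).2 (Or.inl hd0)] at hn3; cases hn3
          exact Or.inr ⟨hn, q, List.mem_cons_of_mem _ hq, hedge⟩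
      · rintro (h | ⟨hn, q, hq, hedge⟩)
        · exact Or.inl ((hA3v x).2 (Or.inl h))
        · rcases List.mem_cons.1 hq with hh | hh
          · subst hh
            exact Or.inl ((hA3v x).2 (Or.inr ⟨hn, hedge⟩))
          · by_cases hhd : tget st3.1 x par none = none
            · exact Or.inr ⟨hhd, q, hh, hedge⟩
            · cases h3 : tget st3.1 x par none with
              | none => exact absurd h3 hhd
              | some dw =>
                rcases (hT3v x par dw hedge.1).1 h3 with hc | ⟨_, _, _, hedge'⟩
                · rw [hn] at hc; cases hc
                · exact Or.inl ((hA3v x).2 (Or.inr ⟨hn, hedge'⟩))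


-- ---- round invariants ----

def TChar (brown : Int) (t : Nat) (v : Array (Array Bool)) : Prop :=
  ∀ (p : Int) (e : Nat), (0 ≤ p ∧ p ≤ 200000) → e < 2 →
    (tget v p e false = true ↔ Vp brown t p e)

def QChar (brown : Int) (t : Nat) (q : List (Int × Nat)) : Prop :=
  (∀ pe ∈ q, pe.2 = t % 2) ∧ (∀ p : Int, ((p, t % 2) ∈ q ↔ Fr brown t p))

def DChar (brown : Int) (t : Nat) (dist : Array (Array (Option Nat))) : Prop :=
  ∀ (p : Int) (e : Nat) (dv : Nat), (0 ≤ p ∧ p ≤ 200000) → e < 2 →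
    (tget dist p e none = some dv ↔ (1 ≤ dv ∧ dv ≤ t ∧ dv % 2 = e ∧ Fr brown dv p))

def FChar (brown : Int) (t : Nat) (fr : List Int) : Prop :=
  ∀ p : Int, (p ∈ fr ↔ Fr brown t p)

theorem dnone_iff (brown : Int) (t : Nat) (dist : Array (Array (Option Nat)))
    (hD : DChar brown t dist) (p : Int) (e : Nat) (hv : 0 ≤ p ∧ p ≤ 200000) (he : e < 2) :
    (tget dist p e none = none ↔ ¬ Vp brown t p e) := by
  constructor
  · intro hn hvp
    obtain ⟨dv, h1, hle, hpar, hfr⟩ := (vp_iff_fr brown t p e).1 hvp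
    rw [(hD p e dv hv he).2 ⟨h1, hle, hpar, hfr⟩] at hn
    cases hn
  · intro hnv
    cases hg : tget dist p e none with
    | none => rfl
    | some dv =>
      obtain ⟨h1, hle, hpar, hfr⟩ := (hD p e dv hv he).1 hg
      exact absurd ((vp_iff_fr brown t p e).2 ⟨dv, h1, hle, hpar, hfr⟩) hnv

theorem tfalse_iff (brown : Int) (t : Nat) (v : Array (Array Bool))
    (hT : TChar brown t v) (p : Int) (e : Nat) (hv : 0 ≤ p ∧ p ≤ 200000) (he : e < 2) :
    (tget v p e false = false ↔ ¬ Vp brown t p e) := by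
  constructor
  · intro hn hvp
    rw [(hT p e hv he).2 hvp] at hn; cases hn
  · intro hnv
    cases hg : tget v p e false with
    | false => rfl
    | true => exact absurd ((hT p e hv he).1 hg) hnv

theorem roundA (brown : Int) (hb : 0 ≤ brown ∧ brown ≤ 200001) (t : Nat)
    (v : Array (Array Bool)) (q : List (Int × Nat))
    (hWF : TblWF v) (hT : TChar brown t v) (hQ : QChar brown t q) :
    TblWF (procA q v []).1 ∧ TChar brown (t + 1) (procA q v []).1 ∧
      QChar brown (t + 1) (procA q v []).2 := by
  have hpos : ∀ pe ∈ q, 0 ≤ pe.1 ∧ pe.1 ≤ 200001 := by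
    intro pe hpe
    have hp2 : pe.2 = t % 2 := hQ.1 pe hpe
    have : (pe.1, t % 2) ∈ q := by rw [← hp2]; exact hpe
    exact fr_range brown hb t pe.1 ((hQ.2 pe.1).1 this)
  obtain ⟨hW', hT', hA'⟩ := procA_char q v [] hWF hpos
  have hqE : ∀ (pp : Int) (ee : Nat),
      ((∃ pe ∈ q, ee = (pe.2 + 1) % 2 ∧ EdgeTo pe.1 pp) ↔
        (ee = (t + 1) % 2 ∧ ∃ p0, Fr brown t p0 ∧ EdgeTo p0 pp)) := by
    intro pp ee
    constructor
    · rintro ⟨pe, hpe, hee, hedge⟩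
      have hp2 : pe.2 = t % 2 := hQ.1 pe hpe
      have hmem : (pe.1, t % 2) ∈ q := by rw [← hp2]; exact hpe
      exact ⟨by omega, pe.1, (hQ.2 pe.1).1 hmem, hedge⟩
    · rintro ⟨hee, p0, hfr, hedge⟩
      exact ⟨(p0, t % 2), (hQ.2 p0).2 hfr, by omega, hedge⟩
  refine ⟨hW', ?_, ?_, ?_⟩
  · intro p e hv he
    rw [hT' p e hv, vp_succ brown t p e, ← hT p e hv he, hqE p e]
  · intro pe hpe
    rcases (hA' pe).1 hpe with h | ⟨_, pe0, hpe0, hee, _⟩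
    · cases h
    · have : pe0.2 = t % 2 := hQ.1 pe0 hpe0
      omega
  · intro p
    rw [hA' (p, (t + 1) % 2)]
    simp only [List.not_mem_nil, false_or]
    constructor
    · rintro ⟨hf, pe, hpe, hee, hedge⟩
      have hrg : 0 ≤ p ∧ p ≤ 200000 := hedge.1
      rw [fr_succ brown t p]
      refine ⟨(hqE p ((t + 1) % 2)).1 ⟨pe, hpe, hee, hedge⟩ |>.2, ?_⟩
      exact (tfalse_iff brown t v hT p ((t + 1) % 2) hrg (by omega)).1 hf
    · intro hfr
      have hs := (fr_succ brown t p).1 hfr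
      obtain ⟨⟨p0, hp0, hedge⟩, hnv⟩ := hs
      have hrg : 0 ≤ p ∧ p ≤ 200000 := hedge.1
      refine ⟨(tfalse_iff brown t v hT p ((t + 1) % 2) hrg (by omega)).2 hnv, ?_⟩
      exact ⟨(p0, t % 2), (hQ.2 p0).2 hp0, by omega, hedge⟩

theorem roundB (brown : Int) (_hb : 0 ≤ brown ∧ brown ≤ 200001) (t : Nat)
    (dist : Array (Array (Option Nat))) (fr : List Int)
    (hWF : TblWF dist) (hD : DChar brown t dist) (hF : FChar brown t fr) :
    TblWF (procB (t + 1) ((t + 1) % 2) fr (dist, [])).1 ∧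
      DChar brown (t + 1) (procB (t + 1) ((t + 1) % 2) fr (dist, [])).1 ∧
      FChar brown (t + 1) (procB (t + 1) ((t + 1) % 2) fr (dist, [])).2.reverse := by
  have hpar : (t + 1) % 2 < 2 := by omega
  obtain ⟨hW', hT', hA'⟩ := procB_char (t + 1) ((t + 1) % 2) hpar fr (dist, []) hWF
  have hfrE : ∀ pp : Int, ((∃ q0 ∈ fr, EdgeTo q0 pp) ↔ (∃ p0, Fr brown t p0 ∧ EdgeTo p0 pp)) := by
    intro pp
    constructor
    · rintro ⟨q0, hq0, hedge⟩; exact ⟨q0, (hF q0).1 hq0, hedge⟩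
    · rintro ⟨p0, hfr0, hedge⟩; exact ⟨p0, (hF p0).2 hfr0, hedge⟩
  refine ⟨hW', ?_, ?_⟩
  · intro p e dv hv he
    rw [hT' p e dv hv]
    constructor
    · rintro (h | ⟨hn, hee, hdd, hex⟩)
      · obtain ⟨h1, hle, hpar', hfr'⟩ := (hD p e dv hv he).1 h
        exact ⟨h1, by omega, hpar', hfr'⟩
      · subst hdd
        have hnv := (dnone_iff brown t dist hD p e hv he).1 hn
        rw [hee] at hnv
        refine ⟨by omega, le_refl _, by omega, ?_⟩
        rw [fr_succ brown t p]
        exact ⟨(hfrE p).1 hex, hnv⟩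
    · rintro ⟨h1, hle, hpar', hfr'⟩
      by_cases hdt : dv ≤ t
      · exact Or.inl ((hD p e dv hv he).2 ⟨h1, hdt, hpar', hfr'⟩)
      · have hdd : dv = t + 1 := by omega
        subst hdd
        obtain ⟨hex, hnv⟩ := (fr_succ brown t p).1 hfr'
        refine Or.inr ⟨?_, by omega, rfl, (hfrE p).2 hex⟩
        rw [dnone_iff brown t dist hD p e hv he]
        rw [show e = (t + 1) % 2 by omega]
        exact hnv
  · intro p
    rw [List.mem_reverse, hA' p]
    simp only [List.not_mem_nil, false_or]
    constructor
    · rintro ⟨hn, hex⟩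
      obtain ⟨q0, hq0, hedge⟩ := hex
      have hrg : 0 ≤ p ∧ p ≤ 200000 := hedge.1
      rw [fr_succ brown t p]
      refine ⟨(hfrE p).1 ⟨q0, hq0, hedge⟩, ?_⟩
      exact (dnone_iff brown t dist hD p ((t + 1) % 2) hrg (by omega)).1 hn
    · intro hfr'
      obtain ⟨hex, hnv⟩ := (fr_succ brown t p).1 hfr'
      obtain ⟨p0, hfr0, hedge⟩ := hex
      have hrg : 0 ≤ p ∧ p ≤ 200000 := hedge.1
      refine ⟨?_, (hfrE p).2 ⟨p0, hfr0, hedge⟩⟩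
      exact (dnone_iff brown t dist hD p ((t + 1) % 2) hrg (by omega)).2 hnv

-- the completed BFS table characterises Fr up to round t + fuel
theorem bfs_char (brown : Int) (hb : 0 ≤ brown ∧ brown ≤ 200001) :
    ∀ (fuel t : Nat) (dist : Array (Array (Option Nat))) (fr : List Int),
    TblWF dist → DChar brown t dist → FChar brown t fr →
    DChar brown (t + fuel) (bfsB fuel dist fr t) := by
  intro fuel
  induction fuel with
  | zero =>
    intro t dist fr _ hD _
    simpa [bfsB] using hD
  | succ fuel ih =>
    intro t dist fr hWF hD hF
    rw [bfsB]
    by_cases hemp : fr = []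
    · rw [if_pos hemp]
      have hFe : ∀ p, ¬ Fr brown t p := by
        intro p hp
        rw [← hF p] at hp
        rw [hemp] at hp
        cases hp
      intro p e dv hv he
      rw [hD p e dv hv he]
      constructor
      · rintro ⟨h1, hle, hpar', hfr'⟩
        exact ⟨h1, by omega, hpar', hfr'⟩
      · rintro ⟨h1, hle, hpar', hfr'⟩
        refine ⟨h1, ?_, hpar', hfr'⟩
        by_contra hgt
        exact fr_empty_ge brown t dv (by omega) hFe p hfr'
    · rw [if_neg hemp]
      obtain ⟨hW', hD', hF'⟩ := roundB brown hb t dist fr hWF hD hF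
      have := ih (t + 1) _ _ hW' hD' hF'
      have harith : t + 1 + fuel = t + (fuel + 1) := by omega
      rw [harith] at this
      exact this

-- initial states
theorem init_TChar (brown : Int) : TChar brown 0 mkVisit := by
  intro p e hv he
  unfold mkVisit
  rw [tget_mk false p e]
  constructor
  · intro h; cases h
  · rintro ⟨d, h1, hle, _, _⟩; omega

theorem init_QChar (brown : Int) : QChar brown 0 [(brown, 0)] := by
  constructor
  · intro pe hpe
    rcases List.mem_singleton.1 hpe with h
    rw [h]
  · intro p
    constructor
    · intro h
      rcases List.mem_singleton.1 h with h
      have hp : p = brown := by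
        have := congrArg Prod.fst h
        simpa using this
      subst hp
      exact ⟨rfl, fun d h1 h2 _ _ => by omega⟩
    · rintro ⟨hr, _⟩
      have : p = brown := hr
      rw [this]
      exact List.mem_singleton.2 rfl

theorem init_DChar (brown : Int) : DChar brown 0 mkDist := by
  intro p e dv hv he
  unfold mkDist
  rw [tget_mk none p e]
  constructor
  · intro h; cases h
  · rintro ⟨h1, hle, _, _⟩; omega

theorem init_FChar (brown : Int) : FChar brown 0 [brown] := by
  intro p
  constructor
  · intro h
    rcases List.mem_singleton.1 h with h
    subst h
    exact ⟨rfl, fun d h1 h2 _ _ => by omega⟩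
  · rintro ⟨hr, _⟩
    have hp : p = brown := hr
    rw [hp]
    exact List.mem_singleton.2 rfl

-- the interleaved loop of A against the scan of B over the finished table
theorem scan_eq (brown : Int) (hb : 0 ≤ brown ∧ brown ≤ 200001)
    (dist : Array (Array (Option Nat))) (hD : DChar brown 500000 dist) :
    ∀ (n time : Nat) (cony : Int) (v : Array (Array Bool)) (q : List (Int × Nat)),
      900 ≤ time + n →
      -200001 ≤ cony →
      2 * cony ≥ (time : Int) * ((time : Int) - 1) - 400002 →
      TblWF v → TChar brown time v → QChar brown time q →
      loopA cony time v q = scanB cony time dist := by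
  intro n
  induction n with
  | zero =>
    intro time cony v q hn hc htri hWF hT hQ
    have ht9 : (900 : Int) ≤ (time : Int) := by exact_mod_cast (by omega : 900 ≤ time)
    have hbig : cony + (time : Int) > 200000 := by nlinarith
    rw [loopA, scanB]
    rw [dif_pos hbig, dif_pos hbig]
  | succ n ih =>
    intro time cony v q hn hc htri hWF hT hQ
    rw [loopA, scanB]
    by_cases hbig : cony + (time : Int) > 200000
    · rw [dif_pos hbig, dif_pos hbig]
    · rw [dif_neg hbig, dif_neg hbig]
      dsimp only
      have htlt : time < 900 := by
        by_contra hge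
        have ht9 : (900 : Int) ≤ (time : Int) := by exact_mod_cast (by omega : 900 ≤ time)
        exact hbig (by nlinarith)
      -- the wrapped read position
      have hcrange : -200001 ≤ cony + (time : Int) ∧ cony + (time : Int) ≤ 200000 := by
        constructor
        · have : (0 : Int) ≤ (time : Int) := Int.natCast_nonneg time
          omega
        · omega
      have hwrap_v : tget v (cony + (time : Int)) (time % 2) false =
          tget v (if cony + (time : Int) < 0 then cony + (time : Int) + 200001
            else cony + (time : Int)) (time % 2) false := by
        split
        · exact tget_wrap v _ _ false hcrange.1 (by omega)
        · rfl
      have hwrap_d : tget dist (cony + (time : Int)) (time % 2) none =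
          tget dist (if cony + (time : Int) < 0 then cony + (time : Int) + 200001
            else cony + (time : Int)) (time % 2) none := by
        split
        · exact tget_wrap dist _ _ none hcrange.1 (by omega)
        · rfl
      set w : Int := (if cony + (time : Int) < 0 then cony + (time : Int) + 200001
            else cony + (time : Int)) with hw
      have hwrange : 0 ≤ w ∧ w ≤ 200000 := by rw [hw]; split <;> omega
      have he2 : time % 2 < 2 := by omega
      -- the two checks agree
      have hcheck : (tget v (cony + (time : Int)) (time % 2) false = true) ↔
          (∃ dv, tget dist (cony + (time : Int)) (time % 2) none = some dv ∧ dv ≤ time) := by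
        rw [hwrap_v, hwrap_d]
        rw [hT w (time % 2) hwrange he2]
        rw [vp_iff_fr brown time w (time % 2)]
        constructor
        · rintro ⟨dv, h1, hle, hpar', hfr'⟩
          exact ⟨dv, (hD w (time % 2) dv hwrange he2).2 ⟨h1, by omega, hpar', hfr'⟩, hle⟩
        · rintro ⟨dv, hg, hle⟩
          obtain ⟨h1, _, hpar', hfr'⟩ := (hD w (time % 2) dv hwrange he2).1 hg
          exact ⟨dv, h1, hle, hpar', hfr'⟩
      cases hA : tget v (cony + (time : Int)) (time % 2) false with
      | true =>
        obtain ⟨dv, hg, hle⟩ := hcheck.1 hA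
        rw [if_pos rfl]
        rw [hg]
        rw [if_pos (by rw [decide_eq_true_iff]; exact hle)]
      | false =>
        rw [if_neg (by simp)]
        have hnot : ¬ ∃ dv, tget dist (cony + (time : Int)) (time % 2) none = some dv ∧ dv ≤ time := by
          intro hex
          rw [hcheck.2 hex] at hA
          cases hA
        have hBf : (match tget dist (cony + (time : Int)) (time % 2) none with
            | some dv => decide (dv ≤ time) | none => false) = false := by
          cases hg : tget dist (cony + (time : Int)) (time % 2) none with
          | none => rfl
          | some dv =>
            by_cases hle : dv ≤ time
            · exact absurd ⟨dv, hg, hle⟩ hnot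
            · simp [hle]
        rw [hBf]
        rw [if_neg (by simp)]
        -- recurse
        obtain ⟨hWF', hT', hQ'⟩ := roundA brown hb time v q hWF hT hQ
        have hcast : ((time + 1 : Nat) : Int) = (time : Int) + 1 := by push_cast; ring
        apply ih (time + 1) (cony + (time : Int)) _ _ (by omega)
        · omega
        · rw [hcast]
          have hexp : ((time : Int) + 1) * ((time : Int) + 1 - 1) =
              (time : Int) * ((time : Int) - 1) + 2 * (time : Int) := by ring
          rw [hexp]
          have : (0 : Int) ≤ (time : Int) := Int.natCast_nonneg time
          omega
        · exact hWF'
        · exact hT'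
        · exact hQ'

-- ===== VERDICT (by name: the statement is the Claim_ definition above) =====
theorem solution_spec : Claim_equal_solution := by
  unfold Claim_equal_solution
  intro cony brown _hdom hpre
  unfold Spec_solution solution solution_alt
  obtain ⟨hc, hrest⟩ := hpre
  rcases hrest with hbig | hb
  · rw [loopA, scanB]
    have hb0 : cony + ((0 : Nat) : Int) > 200000 := by simp; omega
    rw [dif_pos hb0, dif_pos hb0]
  · have hDfin : DChar brown 500000 (bfsB 500000 mkDist [brown] 0) := by
      have := bfs_char brown hb 500000 0 mkDist [brown] (tblWF_mk none)
        (init_DChar brown) (init_FChar brown)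
      simpa using this
    apply scan_eq brown hb _ hDfin 900 0 cony mkVisit [(brown, 0)] (by omega) hc
    · simp
      omega
    · exact tblWF_mk false
    · exact init_TChar brown
    · exact init_QChar brown
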